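-- pv_equiv track=rewrite | github.com/januszry/co_sniffer | lib/Utils.py | str2num
-- ===== SOURCE A (Python) =====
-- def str2num(s):
--     ''' Convert a number to a chr '''
--
--     i = 0
--     l = 0
--     try:
--         for i in range(len(s)):
--             l = l << 8
--             l += ord(s[i])
--         return l
--     except:
--         return 0
-- ===== SOURCE B (Python) =====
-- def str2num(s):
--     ''' Convert a number to a chr '''
--
--     try:
--         return sum(ord(c) << (8 * i) for i, c in enumerate(reversed(s)))
--     except:
--         return 0
-- ===== Notes on version B (the rewrite author's own statement) =====
-- stated objective: alternative
-- what changed: Replaces the Horner-style shift-and-add loop with a sum of independent positional terms ord(c) << 8*i over the reversed string.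
import Mathlib
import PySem

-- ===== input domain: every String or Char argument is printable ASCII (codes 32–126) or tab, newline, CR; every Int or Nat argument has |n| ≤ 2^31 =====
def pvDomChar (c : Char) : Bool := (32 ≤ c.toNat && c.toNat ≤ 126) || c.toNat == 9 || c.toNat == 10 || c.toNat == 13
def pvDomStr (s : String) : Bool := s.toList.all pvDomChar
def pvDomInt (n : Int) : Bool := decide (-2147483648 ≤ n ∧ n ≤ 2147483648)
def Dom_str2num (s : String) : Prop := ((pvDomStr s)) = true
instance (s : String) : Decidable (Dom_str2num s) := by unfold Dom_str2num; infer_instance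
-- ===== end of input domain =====

-- B differs from A only in shape (positional-weight sum vs Horner accumulator); on strings neither raises.

-- ===== PORT A =====
-- A: l starts at 0; for each character, l = (l << 8) + ord(c); iterating s[0..len-1] is
-- exactly a left fold over the character list.
def str2num (s : String) : Int :=
  s.toList.foldl (fun l c => l * 256 + (c.toNat : Int)) 0

-- ===== PORT B =====
-- B: sum(ord(c) << (8*i) for i, c in enumerate(reversed(s)))
def str2num_alt (s : String) : Int :=
  ((PySem.List.enumerate s.toList.reverse 0).map
    (fun p => ((p.2.toNat : Int)) * 2 ^ (8 * p.1).toNat)).sum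

-- ===== PRECONDITION & SPEC =====
def Spec_str2num (s : String) (out : Int) : Prop := out = str2num_alt s
instance (s : String) (out : Int) : Decidable (Spec_str2num s out) := by unfold Spec_str2num; infer_instance

-- ===== CLAIM (what is proved, stated in full; the proofs are below) =====
def Claim_equal_str2num : Prop := ∀ (s : String), Dom_str2num s → Spec_str2num s (str2num s)

-- ===== LEMMAS AND PROOFS =====

theorem pv_fold_eq (xs : List Char) (a : Int) :
    xs.foldl (fun l c => l * 256 + (c.toNat : Int)) a
    = a * 2 ^ (8 * xs.length)
      + ((PySem.List.enumerate xs.reverse 0).map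
          (fun p => ((p.2.toNat : Int)) * 2 ^ (8 * p.1).toNat)).sum := by
  induction xs generalizing a with
  | nil => simp [PySem.List.enumerate_nil]
  | cons x xs ih =>
    simp only [List.foldl_cons, List.reverse_cons]
    rw [ih, PySem.List.enumerate_append]
    simp only [List.map_append, List.sum_append, List.length_reverse,
      PySem.List.enumerate_cons, PySem.List.enumerate_nil, List.map_cons, List.map_nil,
      List.sum_cons, List.sum_nil]
    have h : ((0 : Int) + xs.length) = (xs.length : Int) := by omega
    rw [h]
    have h2 : (8 * (xs.length : Int)).toNat = 8 * xs.length := by omega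
    rw [h2]
    simp only [List.length_cons]
    have h3 : 2 ^ (8 * (xs.length + 1)) = 2 ^ (8 * xs.length) * (256 : Int) := by
      rw [Nat.mul_add, pow_add]; norm_num
    rw [h3]
    ring

-- ===== VERDICT (by name: the statement is the Claim_ definition above) =====
theorem str2num_spec : Claim_equal_str2num := by
  intro s _
  unfold Spec_str2num str2num str2num_alt
  rw [pv_fold_eq]
  simp
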